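-- pv_equiv track=rewrite | github.com/ayyagarisujanreddy123/EzQuant | backend/agent/tools.py | _has_ancestor_of_type
-- ===== SOURCE A (Python) =====
-- def _has_ancestor_of_type(
--     node_id: str, parents: dict, type_by_id: dict, target_type: str
-- ) -> bool:
--     seen: set = set()
--     stack = list(parents.get(node_id, []))
--     while stack:
--         nid = stack.pop()
--         if nid in seen:
--             continue
--         seen.add(nid)
--         if type_by_id.get(nid) == target_type:
--             return True
--         stack.extend(parents.get(nid, []))
--     return False
-- ===== SOURCE B (Python) =====
-- def _has_ancestor_of_type(
--     node_id: str, parents: dict, type_by_id: dict, target_type: str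
-- ) -> bool:
--     reach = set(parents.get(node_id, []))
--     frontier = reach
--     while frontier:
--         frontier = {p for n in frontier for p in parents.get(n, [])} - reach
--         reach |= frontier
--     return any(type_by_id.get(n) == target_type for n in reach)
-- ===== Notes on version B (the rewrite author's own statement) =====
-- stated objective: alternative
-- what changed: Replaces the early-exit explicit-stack DFS with layered breadth-first set saturation: B computes the full ancestor closure by repeated frontier expansion and only then checks whether any node in the closure has the target type.
import Mathlib
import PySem

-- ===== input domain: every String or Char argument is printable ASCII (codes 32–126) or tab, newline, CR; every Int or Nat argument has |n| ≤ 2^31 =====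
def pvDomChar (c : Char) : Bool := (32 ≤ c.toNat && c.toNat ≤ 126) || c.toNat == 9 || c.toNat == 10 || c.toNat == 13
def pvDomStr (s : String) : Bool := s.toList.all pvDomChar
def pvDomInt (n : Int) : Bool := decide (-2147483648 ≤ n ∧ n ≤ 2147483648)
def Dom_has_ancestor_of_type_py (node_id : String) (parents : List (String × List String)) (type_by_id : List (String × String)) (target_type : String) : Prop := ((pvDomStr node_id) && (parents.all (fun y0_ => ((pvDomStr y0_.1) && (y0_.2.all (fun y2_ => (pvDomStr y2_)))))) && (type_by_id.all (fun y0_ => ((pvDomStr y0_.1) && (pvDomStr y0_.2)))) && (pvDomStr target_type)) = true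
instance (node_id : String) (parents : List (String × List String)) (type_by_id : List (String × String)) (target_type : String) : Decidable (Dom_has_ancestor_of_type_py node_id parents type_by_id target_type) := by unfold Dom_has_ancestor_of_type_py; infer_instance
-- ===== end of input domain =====

-- B replaces A's early-exit stack DFS by layered set saturation of the full ancestor
-- closure followed by a type scan; objective: alternative (not claimed faster).

-- ===== PORT A =====
-- parents.get(n, [])  (shared helper: the same dict lookup both Pythons perform)
def pvAdj (parents : List (String × List String)) (n : String) : List String :=
  PySem.Dict.getD (PySem.Dict.mk parents) n []

-- type_by_id.get(n) == target_type  (None compares unequal to any string)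
def pvP (type_by_id : List (String × String)) (target_type : String) (n : String) : Bool :=
  PySem.Dict.get? (PySem.Dict.mk type_by_id) n == some target_type

-- fuel: a totality guard only — one unit per element that can ever be processed;
-- proofs show it never runs out, so it changes no result
def pvFuel (parents : List (String × List String)) (stack : List String) : Nat :=
  stack.length + (parents.map (fun p => p.2.length)).sum + 1

-- A's while loop: pop from the end of the stack, skip seen, test type, push parents
def pvLoopA (parents : List (String × List String)) (type_by_id : List (String × String)) (target_type : String) : Nat → PySem.Set String → List String → Bool
  | 0, _, _ => false
  | fuel + 1, seen, stack =>
    match stack.getLast? with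
    | none => false
    | some nid =>
      let rest := stack.dropLast
      if PySem.Set.contains seen nid then
        pvLoopA parents type_by_id target_type fuel seen rest
      else if pvP type_by_id target_type nid then true
      else pvLoopA parents type_by_id target_type fuel (PySem.Set.add seen nid) (rest ++ pvAdj parents nid)

def has_ancestor_of_type_py (node_id : String) (parents : List (String × List String)) (type_by_id : List (String × String)) (target_type : String) : Bool :=
  pvLoopA parents type_by_id target_type (pvFuel parents (pvAdj parents node_id)) PySem.Set.empty (pvAdj parents node_id)

-- ===== PORT B =====
-- B's while loop: expand the frontier through parents, drop what is already reached,
-- add the new layer to reach, until the frontier is empty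
def pvLoopB (parents : List (String × List String)) : Nat → PySem.Set String → PySem.Set String → PySem.Set String
  | 0, reach, _ => reach
  | fuel + 1, reach, frontier =>
    if frontier.isEmpty then reach
    else
      -- frontier = {p for n in frontier for p in parents.get(n, [])} - reach; reach |= frontier
      pvLoopB parents fuel
        (PySem.Set.union reach (PySem.Set.diff (PySem.Set.ofList (frontier.flatMap (pvAdj parents))) reach))
        (PySem.Set.diff (PySem.Set.ofList (frontier.flatMap (pvAdj parents))) reach)

def has_ancestor_of_type_py_alt (node_id : String) (parents : List (String × List String)) (type_by_id : List (String × String)) (target_type : String) : Bool :=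
  let reach := pvLoopB parents (pvFuel parents (pvAdj parents node_id)) (PySem.Set.ofList (pvAdj parents node_id)) (PySem.Set.ofList (pvAdj parents node_id))
  reach.any (pvP type_by_id target_type)

-- ===== PRECONDITION & SPEC =====
def Spec_has_ancestor_of_type_py (node_id : String) (parents : List (String × List String)) (type_by_id : List (String × String)) (target_type : String) (out : Bool) : Prop := out = has_ancestor_of_type_py_alt node_id parents type_by_id target_type
instance (node_id : String) (parents : List (String × List String)) (type_by_id : List (String × String)) (target_type : String) (out : Bool) : Decidable (Spec_has_ancestor_of_type_py node_id parents type_by_id target_type out) := by unfold Spec_has_ancestor_of_type_py; infer_instance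

-- ===== CLAIM (what is proved, stated in full; the proofs are below) =====
def Claim_equal_has_ancestor_of_type_py : Prop := ∀ (node_id : String) (parents : List (String × List String)) (type_by_id : List (String × String)) (target_type : String), Dom_has_ancestor_of_type_py node_id parents type_by_id target_type → Spec_has_ancestor_of_type_py node_id parents type_by_id target_type (has_ancestor_of_type_py node_id parents type_by_id target_type)

-- ===== LEMMAS AND PROOFS =====

-- n is an ancestor: reachable from `starts` (the parents of the queried node)
inductive PvReach (parents : List (String × List String)) (starts : List String) : String → Prop
  | base {n : String} : n ∈ starts → PvReach parents starts n
  | step {m n : String} : PvReach parents starts m → n ∈ pvAdj parents m → PvReach parents starts n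

-- a path s → … → t all of whose nodes avoid `avoid`
inductive PvAvoid (parents : List (String × List String)) (avoid : List String) : String → String → Prop
  | refl {s : String} : s ∉ avoid → PvAvoid parents avoid s s
  | tail {s m n : String} : PvAvoid parents avoid s m → n ∈ pvAdj parents m → n ∉ avoid → PvAvoid parents avoid s n

lemma mem_pvAdj_flatMap {parents : List (String × List String)} {n x : String}
    (hx : x ∈ pvAdj parents n) : x ∈ parents.flatMap (fun p => p.2) := by
  induction parents with
  | nil =>
      simp [pvAdj, PySem.Dict.getD_eq_get?_getD, PySem.Dict.get?] at hx
  | cons e ps ih =>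
      rw [pvAdj, PySem.Dict.getD_eq_get?_getD] at hx ih
      rw [PySem.Dict.get?_mk_cons] at hx
      by_cases h : e.1 == n
      · simp [h] at hx
        simp [List.mem_flatMap]
        exact Or.inl hx
      · simp [h] at hx
        simp [List.mem_flatMap] at ih ⊢
        rcases ih hx with ⟨a, b, hab, hxb⟩
        exact Or.inr ⟨a, b, hab, hxb⟩

lemma sum_pvAdj_le (parents : List (String × List String)) (U : Finset String) :
    (U.sum fun n => (pvAdj parents n).length) ≤ (parents.map (fun p => p.2.length)).sum := by
  induction parents generalizing U with
  | nil =>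
      simp [pvAdj, PySem.Dict.getD_eq_get?_getD, PySem.Dict.get?]
  | cons e ps ih =>
      have hadj : ∀ n, pvAdj (e :: ps) n = if e.1 == n then e.2 else pvAdj ps n := by
        intro n
        rw [pvAdj, PySem.Dict.getD_eq_get?_getD, PySem.Dict.get?_mk_cons]
        by_cases h : e.1 == n
        · simp [h]
        · simp [h, pvAdj, PySem.Dict.getD_eq_get?_getD]
      by_cases hm : e.1 ∈ U
      · have hsplit : (U.sum fun n => (pvAdj (e :: ps) n).length)
            = (pvAdj (e :: ps) e.1).length + ((U.erase e.1).sum fun n => (pvAdj (e :: ps) n).length) :=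
          (Finset.add_sum_erase U _ hm).symm
        have hcong : ((U.erase e.1).sum fun n => (pvAdj (e :: ps) n).length)
            = ((U.erase e.1).sum fun n => (pvAdj ps n).length) := by
          refine Finset.sum_congr rfl ?_
          intro n hn
          have hne : e.1 ≠ n := by
            intro h; exact (Finset.ne_of_mem_erase hn) h.symm
          rw [hadj n, if_neg (by simpa using hne)]
        have h1 : (pvAdj (e :: ps) e.1).length = e.2.length := by
          rw [hadj e.1, if_pos (by simp)]
        calc (U.sum fun n => (pvAdj (e :: ps) n).length)
            = e.2.length + ((U.erase e.1).sum fun n => (pvAdj ps n).length) := by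
              rw [hsplit, hcong, h1]
          _ ≤ e.2.length + (ps.map (fun p => p.2.length)).sum :=
              Nat.add_le_add_left (ih (U.erase e.1)) _
          _ = ((e :: ps).map (fun p => p.2.length)).sum := by simp
      · have hcong : (U.sum fun n => (pvAdj (e :: ps) n).length)
            = (U.sum fun n => (pvAdj ps n).length) := by
          refine Finset.sum_congr rfl ?_
          intro n hn
          have hne : e.1 ≠ n := by
            intro h; exact hm (h ▸ hn)
          rw [hadj n, if_neg (by simpa using hne)]
        calc (U.sum fun n => (pvAdj (e :: ps) n).length)
            = (U.sum fun n => (pvAdj ps n).length) := hcong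
          _ ≤ (ps.map (fun p => p.2.length)).sum := ih U
          _ ≤ ((e :: ps).map (fun p => p.2.length)).sum := by simp

lemma pvAvoid_start_not_mem {parents : List (String × List String)} {avoid : List String} {s t : String}
    (h : PvAvoid parents avoid s t) : s ∉ avoid := by
  induction h with
  | refl h => exact h
  | tail _ _ _ ih => exact ih

lemma pvAvoid_anti {parents : List (String × List String)} {a b : List String} {s t : String}
    (hab : ∀ y ∈ a, y ∈ b) (h : PvAvoid parents b s t) : PvAvoid parents a s t := by
  induction h with
  | refl h => exact PvAvoid.refl (fun hc => h (hab _ hc))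
  | tail _ hadj hn ih => exact PvAvoid.tail ih hadj (fun hc => hn (hab _ hc))

lemma pvAvoid_extend {parents : List (String × List String)} {avoid : List String} {s t x : String}
    (h : PvAvoid parents avoid s t) (ht : t ≠ x) :
    PvAvoid parents (x :: avoid) s t ∨ ∃ c ∈ pvAdj parents x, PvAvoid parents (x :: avoid) c t := by
  induction h with
  | refl h =>
      refine Or.inl (PvAvoid.refl ?_)
      intro hc
      rcases List.mem_cons.1 hc with h1 | h1
      · exact ht h1
      · exact h h1
  | @tail m n hp hadj hn ih =>
      by_cases hmx : m = x
      · subst hmx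
        refine Or.inr ⟨n, hadj, PvAvoid.refl ?_⟩
        intro hc
        rcases List.mem_cons.1 hc with h1 | h1
        · exact ht h1
        · exact hn h1
      · have hnx : n ∉ x :: avoid := by
          intro hc
          rcases List.mem_cons.1 hc with h1 | h1
          · exact ht h1
          · exact hn h1
        rcases ih hmx with h1 | ⟨c, hc, h2⟩
        · exact Or.inl (PvAvoid.tail h1 hadj hnx)
        · exact Or.inr ⟨c, hc, PvAvoid.tail h2 hadj hnx⟩

lemma pvReach_to_avoid {parents : List (String × List String)} {starts : List String} {t : String}
    (h : PvReach parents starts t) : ∃ s ∈ starts, PvAvoid parents [] s t := by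
  induction h with
  | base hn => exact ⟨_, hn, PvAvoid.refl (by simp)⟩
  | step _ hadj ih =>
      rcases ih with ⟨s, hs, hp⟩
      exact ⟨s, hs, PvAvoid.tail hp hadj (by simp)⟩

lemma pvLoopA_sound (parents : List (String × List String)) (type_by_id : List (String × String))
    (target_type : String) (starts : List String) :
    ∀ (fuel : Nat) (seen : PySem.Set String) (stack : List String),
    (∀ x ∈ stack, PvReach parents starts x) →
    pvLoopA parents type_by_id target_type fuel seen stack = true →
    ∃ t, PvReach parents starts t ∧ pvP type_by_id target_type t = true := by
  intro fuel
  induction fuel with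
  | zero => intro seen stack _ h; simp [pvLoopA] at h
  | succ fuel ih =>
      intro seen stack hst h
      rcases List.eq_nil_or_concat stack with rfl | ⟨rest, nid, rfl⟩
      · simp [pvLoopA] at h
      · rw [pvLoopA] at h
        simp only [List.concat_eq_append, List.getLast?_concat, List.dropLast_concat] at h hst
        have hnid : PvReach parents starts nid := hst nid (by simp)
        by_cases hseen : PySem.Set.contains seen nid
        · rw [if_pos hseen] at h
          exact ih seen rest (fun x hx => hst x (by simp [hx])) h
        · rw [if_neg hseen] at h
          by_cases hP : pvP type_by_id target_type nid
          · exact ⟨nid, hnid, hP⟩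
          · rw [if_neg hP] at h
            refine ih _ (rest ++ pvAdj parents nid) ?_ h
            intro x hx
            rcases List.mem_append.1 hx with hx | hx
            · exact hst x (by simp [hx])
            · exact PvReach.step hnid hx

lemma pvLoopA_complete (parents : List (String × List String)) (type_by_id : List (String × String))
    (target_type : String) :
    ∀ (fuel : Nat) (seen : PySem.Set String) (stack : List String),
    (∀ x ∈ stack, x ∈ parents.flatMap (fun p => p.2)) →
    stack.length + (((parents.flatMap (fun p => p.2)).toFinset.filter (fun n => n ∉ seen)).sum
      (fun n => (pvAdj parents n).length)) ≤ fuel →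
    (∃ s ∈ stack, ∃ t, PvAvoid parents seen s t ∧ pvP type_by_id target_type t = true) →
    pvLoopA parents type_by_id target_type fuel seen stack = true := by
  intro fuel
  induction fuel with
  | zero =>
      intro seen stack _ hfuel hw
      rcases hw with ⟨s, hs, _⟩
      have : 0 < stack.length := List.length_pos_of_mem hs
      omega
  | succ fuel ih =>
      intro seen stack hsub hfuel hw
      rcases List.eq_nil_or_concat stack with rfl | ⟨rest, nid, rfl⟩
      · rcases hw with ⟨s, hs, _⟩; simp at hs
      · rw [pvLoopA]
        simp only [List.concat_eq_append, List.getLast?_concat, List.dropLast_concat] at hsub hw hfuel ⊢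
        simp only [List.length_append, List.length_cons, List.length_nil] at hfuel
        by_cases hseen : PySem.Set.contains seen nid
        · rw [if_pos hseen]
          have hseen' : nid ∈ seen := by simpa using hseen
          refine ih seen rest (fun x hx => hsub x (by simp [hx])) (by omega) ?_
          rcases hw with ⟨s, hs, t, hp, hPt⟩
          rcases List.mem_append.1 hs with hs | hs
          · exact ⟨s, hs, t, hp, hPt⟩
          · simp at hs
            subst hs
            exact absurd hseen' (pvAvoid_start_not_mem hp)
        · rw [if_neg hseen]
          by_cases hP : pvP type_by_id target_type nid
          · rw [if_pos hP]
          · rw [if_neg hP]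
            have hnidseen : nid ∉ seen := by simpa using hseen
            have hnidU : nid ∈ (parents.flatMap (fun p => p.2)).toFinset := by
              rw [List.mem_toFinset]; exact hsub nid (by simp)
            have hadd : PySem.Set.add seen nid = seen ++ [nid] :=
              PySem.Set.add_of_not_mem hnidseen
            have hfilter : ((parents.flatMap (fun p => p.2)).toFinset.filter (fun n => n ∉ seen ++ [nid]))
                = ((parents.flatMap (fun p => p.2)).toFinset.filter (fun n => n ∉ seen)).erase nid := by
              ext y
              simp only [Finset.mem_filter, Finset.mem_erase, List.mem_append, List.mem_singleton]
              constructor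
              · intro ⟨hy1, hy2⟩
                exact ⟨fun he => hy2 (Or.inr he), hy1, fun hm => hy2 (Or.inl hm)⟩
              · intro ⟨hy1, hy2, hy3⟩
                exact ⟨hy2, fun hm => hm.elim hy3 hy1⟩
            have hnidF : nid ∈ ((parents.flatMap (fun p => p.2)).toFinset.filter (fun n => n ∉ seen)) := by
              rw [Finset.mem_filter]; exact ⟨hnidU, hnidseen⟩
            have hsum : (pvAdj parents nid).length
                + (((parents.flatMap (fun p => p.2)).toFinset.filter (fun n => n ∉ seen)).erase nid).sum
                    (fun n => (pvAdj parents n).length)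
                = (((parents.flatMap (fun p => p.2)).toFinset.filter (fun n => n ∉ seen)).sum
                    (fun n => (pvAdj parents n).length)) :=
              Finset.add_sum_erase _ (fun n => (pvAdj parents n).length) hnidF
            rcases hw with ⟨s, hs, t, hp, hPt⟩
            have htnid : t ≠ nid := by
              intro h; rw [h] at hPt; exact hP hPt
            have hanti : ∀ y ∈ seen ++ [nid], y ∈ nid :: seen := by
              intro y hy; simp at hy ⊢; tauto
            have hw' : ∃ s' ∈ rest ++ pvAdj parents nid, ∃ t',
                PvAvoid parents (seen ++ [nid]) s' t' ∧ pvP type_by_id target_type t' = true := by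
              rcases pvAvoid_extend hp htnid with h1 | ⟨c, hc, h2⟩
              · rcases List.mem_append.1 hs with hs' | hs'
                · exact ⟨s, by simp [hs'], t, pvAvoid_anti hanti h1, hPt⟩
                · simp at hs'
                  subst hs'
                  exact absurd (show s ∈ s :: seen by simp) (pvAvoid_start_not_mem h1)
              · exact ⟨c, by simp [hc], t, pvAvoid_anti hanti h2, hPt⟩
            rw [hadd]
            refine ih (seen ++ [nid]) (rest ++ pvAdj parents nid) ?_ ?_ hw'
            · intro x hx
              rcases List.mem_append.1 hx with hx | hx
              · exact hsub x (by simp [hx])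
              · exact mem_pvAdj_flatMap hx
            · rw [hfilter]
              simp only [List.length_append]
              omega

lemma pvLoopB_nil (parents : List (String × List String)) :
    ∀ (fuel : Nat) (reach : PySem.Set String), pvLoopB parents fuel reach [] = reach := by
  intro fuel reach
  cases fuel <;> simp [pvLoopB]

lemma pvLoopB_main (parents : List (String × List String)) (starts : List String) :
    ∀ (fuel : Nat) (reach frontier : PySem.Set String),
    (∀ x ∈ reach, PvReach parents starts x) →
    (∀ x ∈ frontier, x ∈ reach) →
    (∀ x ∈ reach, x ∉ frontier → ∀ c ∈ pvAdj parents x, c ∈ reach) →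
    (∀ x ∈ starts, x ∈ reach) →
    (((parents.flatMap (fun p => p.2)).toFinset.filter (fun n => n ∉ reach)).card + 1 ≤ fuel) →
    (∀ x ∈ pvLoopB parents fuel reach frontier, PvReach parents starts x) ∧
    (∀ x ∈ starts, x ∈ pvLoopB parents fuel reach frontier) ∧
    (∀ x ∈ pvLoopB parents fuel reach frontier, ∀ c ∈ pvAdj parents x, c ∈ pvLoopB parents fuel reach frontier) := by
  intro fuel
  induction fuel with
  | zero => intro reach frontier _ _ _ _ hfuel; omega
  | succ fuel ih =>
      intro reach frontier h1 h2 h3 h4 hfuel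
      by_cases hfe : frontier.isEmpty
      · rw [pvLoopB, if_pos hfe]
        have hfe' : frontier = [] := List.isEmpty_iff.1 hfe
        subst hfe'
        exact ⟨h1, h4, fun x hx c hc => h3 x hx (by simp) c hc⟩
      · rw [pvLoopB, if_neg hfe]
        set frontier' := PySem.Set.diff (PySem.Set.ofList (frontier.flatMap (pvAdj parents))) reach with hf'
        have hmemf' : ∀ y, y ∈ frontier' ↔ ((∃ n ∈ frontier, y ∈ pvAdj parents n) ∧ y ∉ reach) := by
          intro y
          rw [hf', PySem.Set.mem_diff]
          rw [PySem.Set.mem_ofList]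
          simp [List.mem_flatMap]
        have hmemr' : ∀ y, y ∈ PySem.Set.union reach frontier' ↔ (y ∈ reach ∨ y ∈ frontier') :=
          fun y => PySem.Set.mem_union reach frontier' y
        by_cases hf'nil : frontier' = []
        · rw [hf'nil, pvLoopB_nil]
          have hur : ∀ y : String, y ∈ PySem.Set.union reach ([] : PySem.Set String) ↔ y ∈ reach := by
            intro y
            rw [PySem.Set.mem_union]
            simp
          refine ⟨fun x hx => h1 x ((hur x).1 hx), fun x hx => (hur x).2 (h4 x hx), ?_⟩
          intro x hx c hc
          have hxr : x ∈ reach := (hur x).1 hx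
          refine (hur c).2 ?_
          by_cases hxf : x ∈ frontier
          · by_cases hcr : c ∈ reach
            · exact hcr
            · exfalso
              have hcf : c ∈ frontier' := (hmemf' c).2 ⟨⟨x, hxf, hc⟩, hcr⟩
              rw [hf'nil] at hcf
              simp at hcf
          · exact h3 x hxr hxf c hc
        · rcases List.exists_mem_of_ne_nil frontier' hf'nil with ⟨y, hy⟩
          have hy' := (hmemf' y).1 hy
          have hyU : y ∈ (parents.flatMap (fun p => p.2)).toFinset := by
            rcases hy'.1 with ⟨n, _, hyn⟩
            rw [List.mem_toFinset]
            exact mem_pvAdj_flatMap hyn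
          refine ih (PySem.Set.union reach frontier') frontier' ?_ ?_ ?_ ?_ ?_
          · intro x hx
            rcases (hmemr' x).1 hx with hx | hx
            · exact h1 x hx
            · rcases (hmemf' x).1 hx with ⟨⟨n, hn, hxn⟩, _⟩
              exact PvReach.step (h1 n (h2 n hn)) hxn
          · intro x hx
            exact (hmemr' x).2 (Or.inr hx)
          · intro x hx hxf' c hc
            rcases (hmemr' x).1 hx with hxr | hxr
            · by_cases hxf : x ∈ frontier
              · by_cases hcr : c ∈ reach
                · exact (hmemr' c).2 (Or.inl hcr)
                · exact (hmemr' c).2 (Or.inr ((hmemf' c).2 ⟨⟨x, hxf, hc⟩, hcr⟩))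
              · exact (hmemr' c).2 (Or.inl (h3 x hxr hxf c hc))
            · exact absurd hxr hxf'
          · intro x hx
            exact (hmemr' x).2 (Or.inl (h4 x hx))
          · have hsub : ((parents.flatMap (fun p => p.2)).toFinset.filter
                (fun n => n ∉ PySem.Set.union reach frontier'))
                ⊆ ((parents.flatMap (fun p => p.2)).toFinset.filter (fun n => n ∉ reach)).erase y := by
              intro z hz
              rw [Finset.mem_filter] at hz
              rw [Finset.mem_erase, Finset.mem_filter]
              have hz2 : z ∉ reach ∧ z ∉ frontier' := by
                have hz3 := hz.2
                rw [hmemr' z] at hz3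
                tauto
              refine ⟨?_, hz.1, hz2.1⟩
              intro hzy
              subst hzy
              exact hz2.2 hy
            have hyF : y ∈ ((parents.flatMap (fun p => p.2)).toFinset.filter (fun n => n ∉ reach)) := by
              rw [Finset.mem_filter]
              exact ⟨hyU, hy'.2⟩
            have hcard : (((parents.flatMap (fun p => p.2)).toFinset.filter
                (fun n => n ∉ PySem.Set.union reach frontier')).card)
                ≤ (((parents.flatMap (fun p => p.2)).toFinset.filter (fun n => n ∉ reach)).card) - 1 := by
              calc _ ≤ (((parents.flatMap (fun p => p.2)).toFinset.filter (fun n => n ∉ reach)).erase y).card :=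
                    Finset.card_le_card hsub
                _ = _ := by rw [Finset.card_erase_of_mem hyF]
            have hpos : 0 < (((parents.flatMap (fun p => p.2)).toFinset.filter (fun n => n ∉ reach)).card) :=
              Finset.card_pos.2 ⟨y, hyF⟩
            omega

lemma pvReach_in_closed {parents : List (String × List String)} {starts R : List String}
    (hstart : ∀ x ∈ starts, x ∈ R)
    (hclosed : ∀ x ∈ R, ∀ c ∈ pvAdj parents x, c ∈ R)
    {t : String} (h : PvReach parents starts t) : t ∈ R := by
  induction h with
  | base hn => exact hstart _ hn
  | step _ hadj ih => exact hclosed _ ih _ hadj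

lemma card_filter_le_fuel (parents : List (String × List String)) (stack : List String)
    (reach : List String) :
    ((parents.flatMap (fun p => p.2)).toFinset.filter (fun n => n ∉ reach)).card + 1
      ≤ pvFuel parents stack := by
  have h1 : ((parents.flatMap (fun p => p.2)).toFinset.filter (fun n => n ∉ reach)).card
      ≤ (parents.flatMap (fun p => p.2)).toFinset.card :=
    Finset.card_le_card (Finset.filter_subset _ _)
  have h2 : (parents.flatMap (fun p => p.2)).toFinset.card ≤ (parents.flatMap (fun p => p.2)).length :=
    List.toFinset_card_le _
  have h3 : (parents.flatMap (fun p => p.2)).length = (parents.map (fun p => p.2.length)).sum := by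
    simp [List.length_flatMap]
  unfold pvFuel
  omega

lemma A_iff (node_id : String) (parents : List (String × List String))
    (type_by_id : List (String × String)) (target_type : String) :
    has_ancestor_of_type_py node_id parents type_by_id target_type = true ↔
    ∃ t, PvReach parents (pvAdj parents node_id) t ∧ pvP type_by_id target_type t = true := by
  constructor
  · intro h
    exact pvLoopA_sound parents type_by_id target_type (pvAdj parents node_id) _ _ _
      (fun x hx => PvReach.base hx) h
  · intro ⟨t, hr, hP⟩
    rcases pvReach_to_avoid hr with ⟨s, hs, hp⟩
    unfold has_ancestor_of_type_py
    refine pvLoopA_complete parents type_by_id target_type _ PySem.Set.empty _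
      (fun x hx => mem_pvAdj_flatMap hx) ?_ ⟨s, hs, t, ?_, hP⟩
    · have hsum := sum_pvAdj_le parents
        (((parents.flatMap (fun p => p.2)).toFinset.filter (fun n => n ∉ PySem.Set.empty)))
      unfold pvFuel
      omega
    · exact pvAvoid_anti (by simp [PySem.Set.empty]) hp

lemma B_iff (node_id : String) (parents : List (String × List String))
    (type_by_id : List (String × String)) (target_type : String) :
    has_ancestor_of_type_py_alt node_id parents type_by_id target_type = true ↔
    ∃ t, PvReach parents (pvAdj parents node_id) t ∧ pvP type_by_id target_type t = true := by
  have hmain := pvLoopB_main parents (pvAdj parents node_id)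
    (pvFuel parents (pvAdj parents node_id))
    (PySem.Set.ofList (pvAdj parents node_id)) (PySem.Set.ofList (pvAdj parents node_id))
    (fun x hx => PvReach.base ((PySem.Set.mem_ofList _ _).1 hx))
    (fun x hx => hx)
    (fun x _ hxf _ _ => absurd (by assumption) hxf)
    (fun x hx => (PySem.Set.mem_ofList _ _).2 hx)
    (card_filter_le_fuel parents _ _)
  unfold has_ancestor_of_type_py_alt
  simp only [List.any_eq_true]
  constructor
  · intro ⟨t, ht, hP⟩
    exact ⟨t, hmain.1 t ht, hP⟩
  · intro ⟨t, hr, hP⟩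
    exact ⟨t, pvReach_in_closed hmain.2.1 hmain.2.2 hr, hP⟩

-- ===== VERDICT (by name: the statement is the Claim_ definition above) =====
theorem has_ancestor_of_type_py_spec : Claim_equal_has_ancestor_of_type_py := by
  intro node_id parents type_by_id target_type _
  unfold Spec_has_ancestor_of_type_py
  have hA := A_iff node_id parents type_by_id target_type
  have hB := B_iff node_id parents type_by_id target_type
  by_cases h : has_ancestor_of_type_py node_id parents type_by_id target_type = true
  · rw [h, Eq.comm, hB]
    exact hA.1 h
  · have h' : has_ancestor_of_type_py node_id parents type_by_id target_type = false := by
      simpa using h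
    rw [h']
    by_contra hb
    have hb' : has_ancestor_of_type_py_alt node_id parents type_by_id target_type = true := by
      cases hx : has_ancestor_of_type_py_alt node_id parents type_by_id target_type
      · exact absurd hx.symm hb
      · rfl
    exact h (hA.2 (hB.1 hb'))
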